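-- pv_equiv track=rewrite | github.com/Sadeeed/AdventOfCode | 2023/Day05/utils.py | convert_to_map
-- ===== SOURCE A (Python) =====
-- def convert_to_map(values, seeds):
--     destination_start = values[0]
--     source_start = values[1]
--     range_length = values[2]
--     mapped_data = {src: dst for src, dst in zip(range(source_start, source_start + range_length),
--                                                 range(destination_start, destination_start + range_length))}
--     if seeds:
--         mapped_data = {src: dst for src, dst in zip(range(source_start, source_start + range_length),
--                                                     range(destination_start, destination_start + range_length)) if src in seeds}
--     return mapped_data
-- ===== SOURCE B (Python) =====
-- def convert_to_map(values, seeds):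
--     destination_start = values[0]
--     source_start = values[1]
--     range_length = values[2]
--     offset = destination_start - source_start
--     if seeds:
--         keys = sorted({s for s in seeds if source_start <= s < source_start + range_length})
--     else:
--         keys = range(source_start, source_start + range_length)
--     return {k: k + offset for k in keys}
-- ===== Notes on version B (the rewrite author's own statement) =====
-- stated objective: faster
-- what changed: Instead of materialising the whole source range and scanning it (twice, with an O(|seeds|) membership test inside when seeds are given), B computes the destination as a direct offset and, when seeds are given, iterates only over the sorted deduplicated in-range seeds.
import Mathlib
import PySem

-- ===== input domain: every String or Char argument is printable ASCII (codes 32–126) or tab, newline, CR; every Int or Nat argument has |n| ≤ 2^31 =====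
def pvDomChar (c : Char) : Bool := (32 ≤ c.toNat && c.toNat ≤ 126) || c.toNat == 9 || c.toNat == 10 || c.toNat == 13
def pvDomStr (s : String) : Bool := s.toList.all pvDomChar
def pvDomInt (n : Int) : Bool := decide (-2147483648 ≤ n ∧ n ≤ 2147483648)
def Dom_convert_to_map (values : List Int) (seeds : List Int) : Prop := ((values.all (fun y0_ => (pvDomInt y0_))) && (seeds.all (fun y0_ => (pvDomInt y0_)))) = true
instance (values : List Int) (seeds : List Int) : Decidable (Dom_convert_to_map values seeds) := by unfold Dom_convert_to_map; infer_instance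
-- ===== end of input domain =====

-- B replaces A's scan of the whole source range by a direct-offset map over the sorted
-- deduplicated in-range seeds (when seeds are given): objective = faster (asymptotic).

-- ===== PORT A =====
def convert_to_map (values : List Int) (seeds : List Int) : List (Int × Int) :=
  match PySem.List.pyGet? values 0, PySem.List.pyGet? values 1, PySem.List.pyGet? values 2 with
  | some destination_start, some source_start, some range_length =>
    let pairs := (PySem.List.pyRange source_start (source_start + range_length) 1).zip
                 (PySem.List.pyRange destination_start (destination_start + range_length) 1)
    let mapped_data := pairs.foldl (fun d p => d.insert p.1 p.2) (PySem.Dict.empty : PySem.Dict Int Int)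
    let mapped_data := if seeds.isEmpty then mapped_data
      else pairs.foldl (fun d p => if p.1 ∈ seeds then d.insert p.1 p.2 else d)
           (PySem.Dict.empty : PySem.Dict Int Int)
    mapped_data.items
  | _, _, _ => []   -- IndexError: excluded by Pre_convert_to_map

-- ===== PORT B =====
def convert_to_map_alt (values : List Int) (seeds : List Int) : List (Int × Int) :=
  match PySem.List.pyGet? values 0 with
  | none => []   -- IndexError: excluded by Pre_convert_to_map
  | some destination_start =>
    match PySem.List.pyGet? values 1 with
    | none => []
    | some source_start =>
      match PySem.List.pyGet? values 2 with
      | none => []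
      | some range_length =>
        let offset := destination_start - source_start
        let keys := if seeds.isEmpty then
            PySem.List.pyRange source_start (source_start + range_length) 1
          else
            PySem.List.sorted (PySem.Set.ofList (seeds.filter
              (fun s => decide (source_start ≤ s) && decide (s < source_start + range_length))))
              (fun x => x) false
        (keys.foldl (fun d k => d.insert k (k + offset)) (PySem.Dict.empty : PySem.Dict Int Int)).items

-- ===== PRECONDITION & SPEC =====
-- A raises IndexError when values has fewer than three elements; Pre_ requires exactly the three lookups to succeed.
def Pre_convert_to_map (values : List Int) (seeds : List Int) : Prop := 3 ≤ values.length
instance (values : List Int) (seeds : List Int) : Decidable (Pre_convert_to_map values seeds) := by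
  unfold Pre_convert_to_map; infer_instance
def pvWitness_convert_to_map : List Int × List Int := ([50, 98, 2], [79, 14, 55, 13, 98])

def Spec_convert_to_map (values : List Int) (seeds : List Int) (out : List (Int × Int)) : Prop := out = convert_to_map_alt values seeds
instance (values : List Int) (seeds : List Int) (out : List (Int × Int)) : Decidable (Spec_convert_to_map values seeds out) := by unfold Spec_convert_to_map; infer_instance

-- ===== CLAIM (what is proved, stated in full; the proofs are below) =====
def Claim_equal_convert_to_map : Prop := ∀ (values : List Int) (seeds : List Int), Dom_convert_to_map values seeds → Pre_convert_to_map values seeds → Spec_convert_to_map values seeds (convert_to_map values seeds)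

-- ===== LEMMAS AND PROOFS =====

-- Folding plain inserts of fresh, pairwise-distinct keys appends the pairs in order.
theorem items_foldl_insert (ks : List Int) (f : Int → Int) (d : PySem.Dict Int Int)
    (hnd : ks.Nodup) (hd : ∀ k ∈ ks, d.contains k = false) :
    ((ks.map (fun k => (k, f k))).foldl (fun acc q => acc.insert q.1 q.2) d).items
      = d.items ++ ks.map (fun k => (k, f k)) := by
  induction ks generalizing d with
  | nil => simp
  | cons k t ih =>
    simp only [List.map_cons, List.foldl_cons]
    have hkd : d.contains k = false := hd k (by simp)
    rw [ih _ hnd.of_cons ?_]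
    · rw [PySem.Dict.items_insert, hkd]; simp
    · intro k' hk'
      rw [PySem.Dict.contains_insert]
      have hne : k' ≠ k := fun h => (List.nodup_cons.mp hnd).1 (h ▸ hk')
      simp [hne, hd k' (List.mem_cons_of_mem _ hk')]

-- As above but folding over the keys themselves (the shape of B's comprehension).
theorem items_foldl_insert' (ks : List Int) (f : Int → Int) (d : PySem.Dict Int Int)
    (hnd : ks.Nodup) (hd : ∀ k ∈ ks, d.contains k = false) :
    (ks.foldl (fun acc k => acc.insert k (f k)) d).items
      = d.items ++ ks.map (fun k => (k, f k)) := by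
  have h := items_foldl_insert ks f d hnd hd
  rw [List.foldl_map] at h
  simpa using h

-- Same, with a membership guard: only the keys passing the guard are inserted.
theorem items_foldl_insert_filter (ks : List Int) (P : Int → Prop) [DecidablePred P]
    (f : Int → Int) (d : PySem.Dict Int Int)
    (hnd : ks.Nodup) (hd : ∀ k ∈ ks, d.contains k = false) :
    ((ks.map (fun k => (k, f k))).foldl (fun acc q => if P q.1 then acc.insert q.1 q.2 else acc) d).items
      = d.items ++ (ks.filter (fun k => decide (P k))).map (fun k => (k, f k)) := by
  induction ks generalizing d with
  | nil => simp
  | cons k t ih =>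
    simp only [List.map_cons, List.foldl_cons, List.filter_cons]
    by_cases hp : P k
    · simp only [hp, if_true, decide_true]
      have hkd : d.contains k = false := hd k (by simp)
      rw [ih _ hnd.of_cons ?_]
      · rw [PySem.Dict.items_insert, hkd]; simp
      · intro k' hk'
        rw [PySem.Dict.contains_insert]
        have hne : k' ≠ k := fun h => (List.nodup_cons.mp hnd).1 (h ▸ hk')
        simp [hne, hd k' (List.mem_cons_of_mem _ hk')]
    · simp only [hp, if_false, decide_false]
      rw [ih _ hnd.of_cons (fun k' hk' => hd k' (List.mem_cons_of_mem _ hk'))]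
      simp

-- zip(range(s, s+n), range(d, d+n)) pairs each source with source + (d - s).
theorem zip_ranges (s d n : Int) :
    (PySem.List.pyRange s (s + n) 1).zip (PySem.List.pyRange d (d + n) 1)
      = (PySem.List.pyRange s (s + n) 1).map (fun x => (x, x + (d - s))) := by
  rw [PySem.List.pyRange_one s (s + n), PySem.List.pyRange_one d (d + n)]
  have h1 : s + n - s = n := by ring
  have h2 : d + n - d = n := by ring
  rw [h1, h2, List.zip_map', List.map_map]
  refine List.map_congr_left (fun k _ => ?_)
  simp only [Function.comp]
  congr 1
  ring

-- sorted(set of in-range seeds) is exactly the range filtered to the seeds.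
theorem sorted_seeds_eq (v1 v2 : Int) (seeds : List Int) :
    PySem.List.sorted (PySem.Set.ofList (seeds.filter
        (fun s => decide (v1 ≤ s) && decide (s < v1 + v2)))) (fun x => x) false
      = (PySem.List.pyRange v1 (v1 + v2) 1).filter (fun k => decide (k ∈ seeds)) := by
  apply PySem.List.sorted_eq_of_perm_of_pairwise_lt
  · rw [List.perm_ext_iff_of_nodup
      ((PySem.List.nodup_pyRange_one v1 (v1 + v2)).filter _)
      (PySem.Set.nodup_ofList _)]
    intro x
    simp only [List.mem_filter, PySem.List.mem_pyRange_one, PySem.Set.mem_ofList,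
      Bool.and_eq_true, decide_eq_true_eq]
    tauto
  · exact (PySem.List.pairwise_lt_pyRange_one v1 (v1 + v2)).filter _

-- ===== VERDICT (by name: the statement is the Claim_ definition above) =====
theorem convert_to_map_spec : Claim_equal_convert_to_map := by
  intro values seeds _ hpre
  unfold Spec_convert_to_map
  match values with
  | v0 :: v1 :: v2 :: rest =>
    simp only [convert_to_map, convert_to_map_alt, PySem.List.pyGet?, PySem.List.pyIdx?]
    norm_num
    rw [if_pos (show (0:Int) ≤ (rest.length:Int) + 1 + 1 by omega),
        if_pos (show (0:Int) ≤ (rest.length:Int) + 1 by omega),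
        if_pos (show (2:Int) ≤ (rest.length:Int) + 1 + 1 by omega)]
    norm_num
    simp only [show Int.toNat 2 = 2 from rfl, List.getElem?_cons_succ, List.getElem?_cons_zero]
    by_cases hs : seeds = []
    · rw [if_pos hs, if_pos hs, zip_ranges v1 v0 v2,
          items_foldl_insert _ (fun x => x + (v0 - v1)) _
            (PySem.List.nodup_pyRange_one v1 (v1 + v2)) (fun _ _ => PySem.Dict.contains_empty _),
          items_foldl_insert' _ (fun x => x + (v0 - v1)) _
            (PySem.List.nodup_pyRange_one v1 (v1 + v2)) (fun _ _ => PySem.Dict.contains_empty _)]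
    · rw [if_neg hs, if_neg hs, zip_ranges v1 v0 v2,
          items_foldl_insert_filter _ (fun k => k ∈ seeds) (fun x => x + (v0 - v1)) _
            (PySem.List.nodup_pyRange_one v1 (v1 + v2)) (fun _ _ => PySem.Dict.contains_empty _),
          sorted_seeds_eq v1 v2 seeds,
          items_foldl_insert' _ (fun x => x + (v0 - v1)) _
            ((PySem.List.nodup_pyRange_one v1 (v1 + v2)).filter _)
            (fun _ _ => PySem.Dict.contains_empty _)]
  | [] => simp [Pre_convert_to_map] at hpre
  | [_] => simp [Pre_convert_to_map] at hpre
  | [_, _] => simp [Pre_convert_to_map] at hpre
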